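-- pv_equiv track=rewrite | github.com/kapppa-joe/project-euler-trial | p041_050/p048.py | power_last_digits
-- ===== SOURCE A (Python) =====
-- def power_last_digits(num: int, power: int, acc: int = 1, digits_to_keep: int = 10) -> int:
--     # power function which only keeps the last n digits
--     if power == 1:
--         return multiply_keep_last_digits(num, acc, digits_to_keep)
--     elif power % 2 == 0:
--         new_num = multiply_keep_last_digits(num, num, digits_to_keep)
--         return power_last_digits(new_num, power // 2, acc, digits_to_keep)
--     else:
--         new_acc = multiply_keep_last_digits(num, acc, digits_to_keep)
--         return power_last_digits(num, power - 1, new_acc, digits_to_keep)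
--
-- def multiply_keep_last_digits(a: int, b: int, digits_to_keep: int = 10) -> int:
--     sieve = 10 ** digits_to_keep
--     a = a % sieve
--     b = b % sieve
--     return a * b % sieve
-- ===== SOURCE B (Python) =====
-- def power_last_digits(num: int, power: int, acc: int = 1, digits_to_keep: int = 10) -> int:
--     # iterative binary exponentiation: last digits of num**power * acc
--     result = acc
--     base = num
--     while power > 0:
--         if power % 2 == 1:
--             result = multiply_keep_last_digits(result, base, digits_to_keep)
--         base = multiply_keep_last_digits(base, base, digits_to_keep)
--         power //= 2
--     return result
--
-- def multiply_keep_last_digits(a: int, b: int, digits_to_keep: int = 10) -> int: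
--     sieve = 10 ** digits_to_keep
--     a = a % sieve
--     b = b % sieve
--     return a * b % sieve
-- ===== Notes on version B (the rewrite author's own statement) =====
-- stated objective: idiomatic
-- what changed: A's recursion-with-accumulator (square on even power, fold into acc on odd) is replaced by the standard iterative binary-exponentiation bit loop, reusing the same mod-10**digits_to_keep multiply helper; Pre_ excludes digits_to_keep < 0, where 10 ** digits_to_keep is a float so A returns a float, not an int.
-- outside the precondition, e.g. on power_last_digits(2, 2, 1, -1): A returns 0.0009999999999999974, B returns 0.0009999999999999974
-- crash fix: For power <= 0 A recurses forever and raises RecursionError, while B's loop body never runs and it returns acc (the natural value acc * num**0 at power = 0). — e.g. on power_last_digits(2, 0, 5, 10): A raises RecursionError, B returns 5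
import Mathlib
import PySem

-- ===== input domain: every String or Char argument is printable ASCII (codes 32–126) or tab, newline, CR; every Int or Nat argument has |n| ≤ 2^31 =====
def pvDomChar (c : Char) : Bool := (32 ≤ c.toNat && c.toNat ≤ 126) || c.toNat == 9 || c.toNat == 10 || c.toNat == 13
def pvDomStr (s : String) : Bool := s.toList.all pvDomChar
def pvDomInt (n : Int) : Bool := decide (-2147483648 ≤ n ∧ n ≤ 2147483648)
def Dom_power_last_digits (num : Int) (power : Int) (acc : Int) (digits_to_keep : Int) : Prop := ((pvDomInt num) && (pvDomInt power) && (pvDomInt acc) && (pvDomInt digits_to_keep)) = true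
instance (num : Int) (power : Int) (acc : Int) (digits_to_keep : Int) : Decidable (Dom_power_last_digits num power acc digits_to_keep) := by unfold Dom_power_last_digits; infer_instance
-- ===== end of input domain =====

-- B rewrites A's recursion-with-accumulator as an explicit iterative bit loop (idiomatic binary exponentiation).
-- ===== PORT A =====
-- helper multiply_keep_last_digits (shared verbatim by Source A and Source B); exact for digits_to_keep ≥ 0
def multiplyKeepLastDigits (a : Int) (b : Int) (digits_to_keep : Int) : Int :=
  let sieve : Int := 10 ^ digits_to_keep.toNat
  let a := PySem.Int.mod a sieve
  let b := PySem.Int.mod b sieve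
  PySem.Int.mod (a * b) sieve

-- literal port of A's recursion; the 'power ≤ 0' guard only makes it total (Python recurses forever there; excluded by Pre_)
def power_last_digits (num : Int) (power : Int) (acc : Int) (digits_to_keep : Int) : Int :=
  if power ≤ 0 then 0
  else if power = 1 then multiplyKeepLastDigits num acc digits_to_keep
  else if PySem.Int.mod power 2 = 0 then
    power_last_digits (multiplyKeepLastDigits num num digits_to_keep) (PySem.Int.floordiv power 2) acc digits_to_keep
  else
    power_last_digits num (power - 1) (multiplyKeepLastDigits num acc digits_to_keep) digits_to_keep
termination_by power.toNat
decreasing_by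
  · have := PySem.Int.floordiv_eq_ediv_of_pos (a := power) (b := 2) (by omega)
    omega
  · omega

-- ===== PORT B =====
-- the while loop of Source B, state (base, power, result)
def pvAltLoop (base : Int) (power : Int) (result : Int) (digits_to_keep : Int) : Int :=
  if power > 0 then
    let result := if PySem.Int.mod power 2 = 1 then multiplyKeepLastDigits result base digits_to_keep else result
    pvAltLoop (multiplyKeepLastDigits base base digits_to_keep) (PySem.Int.floordiv power 2) result digits_to_keep
  else result
termination_by power.toNat
decreasing_by
  have := PySem.Int.floordiv_eq_ediv_of_pos (a := power) (b := 2) (by omega)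
  omega

def power_last_digits_alt (num : Int) (power : Int) (acc : Int) (digits_to_keep : Int) : Int :=
  pvAltLoop num power acc digits_to_keep

-- ===== PRECONDITION & SPEC =====
-- Pre_ excludes power ≤ 0, where A recurses forever (RecursionError), and digits_to_keep < 0,
-- where 10 ** digits_to_keep is a float in Python so A's return value is a float, not an int.
def Pre_power_last_digits (num : Int) (power : Int) (acc : Int) (digits_to_keep : Int) : Prop :=
  1 ≤ power ∧ 0 ≤ digits_to_keep
instance (num : Int) (power : Int) (acc : Int) (digits_to_keep : Int) : Decidable (Pre_power_last_digits num power acc digits_to_keep) := by unfold Pre_power_last_digits; infer_instance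
def pvWitness_power_last_digits : Int × Int × Int × Int := (7, 11, 1, 10)

-- On power ≤ 0 the Python A raises RecursionError while B returns acc (= acc · num^0 for power = 0), the natural value.
def Raises_power_last_digits (num : Int) (power : Int) (acc : Int) (digits_to_keep : Int) : Prop := power ≤ 0
instance (num : Int) (power : Int) (acc : Int) (digits_to_keep : Int) : Decidable (Raises_power_last_digits num power acc digits_to_keep) := by unfold Raises_power_last_digits; infer_instance
def pvRaiseWitness_power_last_digits : Int × Int × Int × Int := (2, 0, 5, 10)
def pvRaiseWitnessOut_power_last_digits : Int := 5

def Spec_power_last_digits (num : Int) (power : Int) (acc : Int) (digits_to_keep : Int) (out : Int) : Prop := out = power_last_digits_alt num power acc digits_to_keep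
instance (num : Int) (power : Int) (acc : Int) (digits_to_keep : Int) (out : Int) : Decidable (Spec_power_last_digits num power acc digits_to_keep out) := by unfold Spec_power_last_digits; infer_instance

-- ===== CLAIM (what is proved, stated in full; the proofs are below) =====
def Claim_equal_power_last_digits : Prop := ∀ (num : Int) (power : Int) (acc : Int) (digits_to_keep : Int), Dom_power_last_digits num power acc digits_to_keep → Pre_power_last_digits num power acc digits_to_keep → Spec_power_last_digits num power acc digits_to_keep (power_last_digits num power acc digits_to_keep)
def Claim_raises_power_last_digits : Prop := (∀ (num : Int) (power : Int) (acc : Int) (digits_to_keep : Int), Dom_power_last_digits num power acc digits_to_keep → Raises_power_last_digits num power acc digits_to_keep → ¬ Pre_power_last_digits num power acc digits_to_keep) ∧ (Dom_power_last_digits (pvRaiseWitness_power_last_digits.1) (pvRaiseWitness_power_last_digits.2.1) (pvRaiseWitness_power_last_digits.2.2.1) (pvRaiseWitness_power_last_digits.2.2.2) ∧ Raises_power_last_digits (pvRaiseWitness_power_last_digits.1) (pvRaiseWitness_power_last_digits.2.1) (pvRaiseWitness_power_last_digits.2.2.1) (pvRaiseWitness_power_last_digits.2.2.2) ∧ power_last_digits_alt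 (pvRaiseWitness_power_last_digits.1) (pvRaiseWitness_power_last_digits.2.1) (pvRaiseWitness_power_last_digits.2.2.1) (pvRaiseWitness_power_last_digits.2.2.2) = pvRaiseWitnessOut_power_last_digits)

-- ===== LEMMAS AND PROOFS =====

theorem int_pow_emod (a : Int) (k : Nat) (n : Int) : a ^ k % n = (a % n) ^ k % n := by
  induction k with
  | zero => simp
  | succ k ih =>
    rw [pow_succ, pow_succ, Int.mul_emod, ih, Int.mul_emod ((a % n) ^ k),
      Int.emod_emod_of_dvd _ dvd_rfl]

-- With M = 10 ^ d.toNat > 0, Python's mod is Lean's emod, and the helper is multiplication mod M.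
theorem mulKeep_eq (a b d : Int) :
    multiplyKeepLastDigits a b d = (a * b) % (10 ^ d.toNat) := by
  have hM : (0:Int) < 10 ^ d.toNat := by positivity
  unfold multiplyKeepLastDigits
  rw [PySem.Int.mod_eq_emod_of_pos hM, PySem.Int.mod_eq_emod_of_pos hM,
    PySem.Int.mod_eq_emod_of_pos hM, ← Int.mul_emod]

theorem A_closed_form (num power acc d : Int) (hp : 1 ≤ power) :
    power_last_digits num power acc d = (num ^ power.toNat * acc) % (10 ^ d.toNat) := by
  generalize hn : power.toNat = n
  induction n using Nat.strong_induction_on generalizing num power acc with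
  | _ n ih =>
    by_cases h1 : power = 1
    · subst h1
      rw [power_last_digits, if_neg (by omega), if_pos rfl, mulKeep_eq]
      have : n = 1 := by omega
      subst this; rw [pow_one]
    · have hmod2 : PySem.Int.mod power 2 = power % 2 :=
        PySem.Int.mod_eq_emod_of_pos (by omega)
      have hfd : PySem.Int.floordiv power 2 = power / 2 :=
        PySem.Int.floordiv_eq_ediv_of_pos (by omega)
      rw [power_last_digits, if_neg (by omega), if_neg h1, hmod2, hfd]
      by_cases he : power % 2 = 0
      · rw [if_pos he]
        have hge : 1 ≤ power / 2 := by omega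
        have hlt : (power / 2).toNat < n := by omega
        rw [ih _ hlt _ _ _ hge rfl, mulKeep_eq]
        have hk : n = 2 * (power / 2).toNat := by omega
        subst hk
        rw [Int.mul_emod, int_pow_emod, Int.emod_emod_of_dvd _ dvd_rfl, ← int_pow_emod,
          ← Int.mul_emod, pow_mul, pow_two]
      · rw [if_neg he]
        have hge : 1 ≤ power - 1 := by omega
        have hlt : (power - 1).toNat < n := by omega
        rw [ih _ hlt _ _ _ hge rfl, mulKeep_eq]
        have hk : n = (power - 1).toNat + 1 := by omega
        subst hk
        rw [Int.mul_emod, Int.emod_emod_of_dvd _ dvd_rfl, ← Int.mul_emod]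
        congr 1; ring

theorem B_closed_form (base power result d : Int) (hp : 1 ≤ power) :
    pvAltLoop base power result d = (base ^ power.toNat * result) % (10 ^ d.toNat) := by
  generalize hn : power.toNat = n
  induction n using Nat.strong_induction_on generalizing base power result with
  | _ n ih =>
    have hmod2 : PySem.Int.mod power 2 = power % 2 :=
      PySem.Int.mod_eq_emod_of_pos (by omega)
    have hfd : PySem.Int.floordiv power 2 = power / 2 :=
      PySem.Int.floordiv_eq_ediv_of_pos (by omega)
    rw [pvAltLoop, if_pos (by omega)]
    simp only [hmod2, hfd]
    by_cases h1 : power = 1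
    · subst h1
      norm_num
      rw [pvAltLoop, if_neg (by omega), mulKeep_eq]
      have : n = 1 := by omega
      subst this; rw [pow_one, mul_comm]
    · have hge : 1 ≤ power / 2 := by omega
      have hlt : (power / 2).toNat < n := by omega
      by_cases he : power % 2 = 1
      · rw [if_pos he, ih _ hlt _ _ _ hge rfl, mulKeep_eq, mulKeep_eq]
        have hk : n = 2 * (power / 2).toNat + 1 := by omega
        subst hk
        rw [Int.mul_emod, int_pow_emod, Int.emod_emod_of_dvd _ dvd_rfl,
          Int.emod_emod_of_dvd _ dvd_rfl, ← int_pow_emod, ← Int.mul_emod]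
        congr 1; ring
      · rw [if_neg he, ih _ hlt _ _ _ hge rfl, mulKeep_eq]
        have hk : n = 2 * (power / 2).toNat := by omega
        subst hk
        rw [Int.mul_emod, int_pow_emod, Int.emod_emod_of_dvd _ dvd_rfl, ← int_pow_emod,
          ← Int.mul_emod, pow_mul, pow_two]

-- ===== VERDICT (by name: the statement is the Claim_ definition above) =====
theorem power_last_digits_spec : Claim_equal_power_last_digits := by
  intro num power acc d _ hpre
  unfold Spec_power_last_digits power_last_digits_alt
  rw [A_closed_form num power acc d hpre.1, B_closed_form num power acc d hpre.1]

@[simp]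
theorem power_last_digits_raises : Claim_raises_power_last_digits := by
  unfold Claim_raises_power_last_digits
  refine ⟨by intro _ _ _ _ _ hr hpre; exact absurd hpre.1 (by unfold Raises_power_last_digits at hr; omega),
    by decide, by decide, ?_⟩
  show power_last_digits_alt 2 0 5 10 = 5
  rw [power_last_digits_alt, pvAltLoop]
  norm_num
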